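-- pv_equiv track=rewrite | github.com/daiyixin/autoclone | Autopull.py | alias_list_has
-- ===== SOURCE A (Python) =====
-- def alias_list_has(lstList, strArg): #SUMMARY: check if an arg exists in an alias list plainly or with single or double dashes.
-- 	blnFound = False
--
-- 	for strString in lstList:
-- 		if (
-- 			strString.lower() == strArg.lower() or
-- 			"-" + strString.lower() == strArg.lower() or
-- 			"--" + strString.lower() == strArg.lower()
-- 		):
-- 			blnFound = True
-- 			break
--
-- 	return blnFound
-- ===== SOURCE B (Python) =====
-- def _bsearch_sorted(low, x):
--     lo, hi = 0, len(low)
--     while lo < hi: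
--         mid = (lo + hi) // 2
--         if low[mid] < x:
--             lo = mid + 1
--         else:
--             hi = mid
--     return lo < len(low) and low[lo] == x
--
-- def alias_list_has(lstList, strArg):
--     low = sorted(s.lower() for s in lstList)
--     a = strArg.lower()
--     nd = 0
--     while nd < 2 and nd < len(a) and a[nd] == "-":
--         nd += 1
--     for i in range(nd + 1):
--         if _bsearch_sorted(low, a[i:]):
--             return True
--     return False
-- ===== Notes on version B (the rewrite author's own statement) =====
-- stated objective: alternative
-- what changed: B sorts the lowercased alias list once and runs a hand-written binary search for each de-prefixed form of the argument (obtained by counting up to two leading dashes), instead of A's linear scan that re-lowercases the argument and concatenates '-' and '--' onto every element to compare three decorated variants.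
import Mathlib
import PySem

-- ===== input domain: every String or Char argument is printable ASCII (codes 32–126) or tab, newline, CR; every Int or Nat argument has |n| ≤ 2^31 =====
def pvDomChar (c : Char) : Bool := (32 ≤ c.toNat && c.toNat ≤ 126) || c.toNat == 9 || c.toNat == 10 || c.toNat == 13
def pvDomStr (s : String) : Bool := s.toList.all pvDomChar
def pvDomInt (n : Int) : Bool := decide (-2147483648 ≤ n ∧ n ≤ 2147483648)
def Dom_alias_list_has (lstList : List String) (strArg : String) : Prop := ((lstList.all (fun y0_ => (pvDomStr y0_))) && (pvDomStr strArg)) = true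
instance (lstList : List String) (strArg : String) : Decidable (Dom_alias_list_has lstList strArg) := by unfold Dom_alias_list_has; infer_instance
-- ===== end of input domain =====

-- B sorts the lowercased aliases once and binary-searches for each de-prefixed form of the
-- argument (obtained by counting up to two leading dashes), replacing A's linear scan that
-- concatenates dash prefixes onto every element (objective: alternative).

-- ===== PORT A =====
-- for-loop with break; blnFound realised as early return of the structural recursion
def alias_list_has (lstList : List String) (strArg : String) : Bool :=
  match lstList with
  | [] => false
  | strString :: rest =>
    if (PySem.Str.lower strString == PySem.Str.lower strArg) ||
       ("-" ++ PySem.Str.lower strString == PySem.Str.lower strArg) ||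
       ("--" ++ PySem.Str.lower strString == PySem.Str.lower strArg) then
      true
    else
      alias_list_has rest strArg

-- ===== PORT B =====
-- B is proved on the List-Char side (PySem's string representation; '<' on List Char is
-- Python's code-point string comparison).  pvBsearchGo is the while-loop of _bsearch_sorted:
-- state (lo, hi); fuel only makes the recursion structural (fuel >= hi - lo at every call, so
-- the fuel-0 branch is the loop-exit check, reached with lo = hi); midpoint (lo+hi)/2 in Nat
-- = Python's (lo+hi)//2 on these nonnegative ints
def pvBsearchGo (low : List (List Char)) (x : List Char) : Nat → Nat → Nat → Bool
  | 0, lo, _hi =>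
    decide (lo < low.length) && (PySem.List.pyGetD low ((lo : Nat) : Int) [] == x)
  | fuel + 1, lo, hi =>
    if lo < hi then
      if PySem.List.pyGetD low (((lo + hi) / 2 : Nat) : Int) [] < x then
        pvBsearchGo low x fuel ((lo + hi) / 2 + 1) hi
      else
        pvBsearchGo low x fuel lo ((lo + hi) / 2)
    else
      decide (lo < low.length) && (PySem.List.pyGetD low ((lo : Nat) : Int) [] == x)

def pvBsearch (low : List (List Char)) (x : List Char) : Bool :=
  pvBsearchGo low x low.length 0 low.length

-- the while-loop counting leading dashes (nd < 2 and nd < len(a) and a[nd] == "-");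
-- fuel 2 makes it structural and is never exhausted before the nd < 2 test fails
def pvDashLoop (a : List Char) : Nat → Nat → Nat
  | 0, nd => nd
  | fuel + 1, nd =>
    if nd < 2 ∧ (nd : Int) < PySem.List.len a ∧ PySem.List.pyGet? a (nd : Int) = some '-' then
      pvDashLoop a fuel (nd + 1)
    else nd

def alias_list_has_alt (lstList : List String) (strArg : String) : Bool :=
  let low := PySem.List.sorted (lstList.map (fun s => (PySem.Str.lower s).toList)) (fun cs => cs) false
  let a := (PySem.Str.lower strArg).toList
  let nd := pvDashLoop a 2 0
  (PySem.List.pyRange 0 ((nd : Int) + 1) 1).any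
    (fun i => pvBsearch low (PySem.List.slice a (some i) none))

-- ===== PRECONDITION & SPEC =====
def Spec_alias_list_has (lstList : List String) (strArg : String) (out : Bool) : Prop := out = alias_list_has_alt lstList strArg
instance (lstList : List String) (strArg : String) (out : Bool) : Decidable (Spec_alias_list_has lstList strArg out) := by unfold Spec_alias_list_has; infer_instance

-- ===== CLAIM (what is proved, stated in full; the proofs are below) =====
def Claim_equal_alias_list_has : Prop := ∀ (lstList : List String) (strArg : String), Dom_alias_list_has lstList strArg → Spec_alias_list_has lstList strArg (alias_list_has lstList strArg)

-- ===== LEMMAS AND PROOFS =====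

-- A as an `any` over the list
theorem A_eq_any (lstList : List String) (strArg : String) :
    alias_list_has lstList strArg = lstList.any (fun s =>
      (PySem.Str.lower s == PySem.Str.lower strArg) ||
      ("-" ++ PySem.Str.lower s == PySem.Str.lower strArg) ||
      ("--" ++ PySem.Str.lower s == PySem.Str.lower strArg)) := by
  induction lstList with
  | nil => rfl
  | cons s rest ih =>
    simp only [alias_list_has, List.any_cons]
    split_ifs with h
    · simp [h]
    · simp [h, ih]

-- sorted lists are monotone at indices
theorem pairwise_le_getElem_mono (low : List (List Char)) (hp : low.Pairwise (· ≤ ·))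
    (p q : Nat) (hq : q < low.length) (hpq : p ≤ q) :
    low[p]'(Nat.lt_of_le_of_lt hpq hq) ≤ low[q] := by
  rcases Nat.lt_or_eq_of_le hpq with h | h
  · exact (List.pairwise_iff_getElem.mp hp) p q (by omega) hq h
  · subst h; exact le_refl _

-- the loop-exit check of the binary search decides membership, given the loop invariants at lo
theorem pvBsearchExit (low : List (List Char)) (x : List Char) (hp : low.Pairwise (· ≤ ·)) (lo : Nat)
    (hlow : ∀ j, (hj : j < low.length) → j < lo → low[j] < x)
    (hhigh : ∀ j, (hj : j < low.length) → lo ≤ j → x ≤ low[j]) :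
    ((decide (lo < low.length) && (PySem.List.pyGetD low ((lo : Nat) : Int) [] == x)) = true ↔ x ∈ low) := by
  constructor
  · intro h
    simp only [Bool.and_eq_true, decide_eq_true_eq, beq_iff_eq] at h
    obtain ⟨h1, h2⟩ := h
    rw [PySem.List.pyGetD_natCast] at h2
    rw [List.getD_eq_getElem?_getD, List.getElem?_eq_getElem h1] at h2
    simp only [Option.getD_some] at h2
    rw [← h2]; exact List.getElem_mem _
  · intro hx
    obtain ⟨j, hj, hjx⟩ := List.mem_iff_getElem.mp hx
    have hjlo : lo ≤ j := by
      by_contra hc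
      exact absurd hjx (ne_of_lt (hlow j hj (by omega)))
    have hlolen : lo < low.length := by omega
    have h1 : x ≤ low[lo] := hhigh lo hlolen (le_refl _)
    have h2 : low[lo]'hlolen ≤ low[j] := pairwise_le_getElem_mono low hp lo j hj hjlo
    have : low[lo]'hlolen = x := le_antisymm (hjx ▸ h2) h1
    simp only [Bool.and_eq_true, decide_eq_true_eq, beq_iff_eq]
    refine ⟨hlolen, ?_⟩
    rw [PySem.List.pyGetD_natCast, List.getD_eq_getElem?_getD, List.getElem?_eq_getElem hlolen]
    simpa using this

-- binary search on a sorted list decides membership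
theorem pvBsearchGo_eq (low : List (List Char)) (x : List Char)
    (hp : low.Pairwise (· ≤ ·)) :
    ∀ (n lo hi : Nat), hi - lo ≤ n → lo ≤ hi → hi ≤ low.length →
    (∀ j, (hj : j < low.length) → j < lo → low[j] < x) →
    (∀ j, (hj : j < low.length) → hi ≤ j → x ≤ low[j]) →
    (pvBsearchGo low x n lo hi = true ↔ x ∈ low) := by
  intro n
  induction n with
  | zero =>
    intro lo hi hn hlh hhi hlow hhigh
    have hlo : lo = hi := by omega
    subst hlo
    exact pvBsearchExit low x hp lo hlow hhigh
  | succ n ih =>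
    intro lo hi hn hlh hhi hlow hhigh
    by_cases h : lo < hi
    · simp only [pvBsearchGo, h, if_true]
      have hmidlt : (lo + hi) / 2 < hi := by omega
      have hmidge : lo ≤ (lo + hi) / 2 := by omega
      have hmidlen : (lo + hi) / 2 < low.length := by omega
      have hget : PySem.List.pyGetD low (((lo + hi) / 2 : Nat) : Int) [] = low[(lo + hi) / 2] := by
        rw [PySem.List.pyGetD_natCast, List.getD_eq_getElem?_getD, List.getElem?_eq_getElem hmidlen]
        rfl
      rw [hget]
      by_cases hc : low[(lo + hi) / 2] < x
      · simp only [hc, if_true]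
        apply ih ((lo + hi) / 2 + 1) hi (by omega) (by omega) hhi
        · intro j hj hjlt
          calc low[j] ≤ low[(lo + hi) / 2] := pairwise_le_getElem_mono low hp j _ hmidlen (by omega)
            _ < x := hc
        · exact hhigh
      · simp only [hc, if_false]
        apply ih lo ((lo + hi) / 2) (by omega) (by omega) (by omega) hlow
        intro j hj hmj
        calc x ≤ low[(lo + hi) / 2] := not_lt.mp hc
          _ ≤ low[j] := pairwise_le_getElem_mono low hp _ j hj hmj
    · simp only [pvBsearchGo, h, if_false]
      have hlo : lo = hi := by omega
      subst hlo
      exact pvBsearchExit low x hp lo hlow hhigh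

theorem pvBsearch_eq (low : List (List Char)) (x : List Char) (hp : low.Pairwise (· ≤ ·)) :
    (pvBsearch low x = true ↔ x ∈ low) := by
  unfold pvBsearch
  exact pvBsearchGo_eq low x hp low.length 0 low.length (by omega) (by omega) (le_refl _)
    (fun j hj hjlt => absurd hjlt (Nat.not_lt_zero j))
    (fun j hj hle => absurd hj (by omega))

-- pvBsearch over the sorted lowered list decides membership in the unsorted list
theorem bsearch_sorted_mem (m : List (List Char)) (x : List Char) :
    (pvBsearch (PySem.List.sorted m (fun cs => cs) false) x = true ↔ x ∈ m) := by
  -- align the DecidableLT instance of `sorted_pairwise` with the one the port's call elaborated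
  have hi : (LinearOrder.toDecidableLT : DecidableLT (List Char)) = (fun a b => a.decidableLT b) :=
    funext fun a => funext fun b => Subsingleton.elim _ _
  have hp := PySem.List.sorted_pairwise m (fun cs : List Char => cs)
  rw [hi] at hp
  rw [pvBsearch_eq _ x hp]
  exact PySem.List.mem_sorted m (fun cs => cs) false x

-- a slice a[i:] at a Nat index is a drop
theorem slice_eq_drop (a t : List Char) (k : Nat) :
    PySem.List.slice a (some (k : Int)) none = t ↔ a.drop k = t := by
  rw [PySem.List.slice_from_natCast]

-- String equalities as List-Char equalities
theorem strEq0 (x y : String) : x = y ↔ x.toList = y.toList := Iff.symm String.toList_inj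
theorem strEq1 (x y : String) : "-" ++ x = y ↔ '-' :: x.toList = y.toList := by
  rw [← String.toList_inj, String.toList_append]
  have hd : ("-" : String).toList = ['-'] := rfl
  rw [hd, List.singleton_append]
theorem strEq2 (x y : String) : "--" ++ x = y ↔ '-' :: '-' :: x.toList = y.toList := by
  rw [← String.toList_inj, String.toList_append]
  have hdd : ("--" : String).toList = ['-', '-'] := rfl
  rw [hdd]
  rfl

-- the whole three-way disjunction, String side to List-Char side
theorem strDisj (x y : String) :
    (x = y ∨ "-" ++ x = y ∨ "--" ++ x = y) ↔
    (x.toList = y.toList ∨ '-' :: x.toList = y.toList ∨ '-' :: '-' :: x.toList = y.toList) := by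
  rw [strEq0, strEq1, strEq2]

-- the dash-counting loop, by the shape of a
theorem dash_nil (a : List Char) (h : a = []) : pvDashLoop a 2 0 = 0 := by
  simp [pvDashLoop, PySem.List.len_eq, h]

theorem dash_not (a : List Char) (c : Char) (tl : List Char) (h : a = c :: tl) (hc : c ≠ '-') :
    pvDashLoop a 2 0 = 0 := by
  simp [pvDashLoop, PySem.List.len_eq, h, hc]

theorem dash_one_nil (a : List Char) (h : a = ['-']) : pvDashLoop a 2 0 = 1 := by
  simp [pvDashLoop, PySem.List.len_eq, h]

theorem dash_one (a : List Char) (c : Char) (tl : List Char) (h : a = '-' :: c :: tl) (hc : c ≠ '-') :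
    pvDashLoop a 2 0 = 1 := by
  simp [pvDashLoop, PySem.List.len_eq, h, hc]
  omega

theorem dash_two (a : List Char) (tl : List Char) (h : a = '-' :: '-' :: tl) :
    pvDashLoop a 2 0 = 2 := by
  simp [pvDashLoop, PySem.List.len_eq, h]
  omega

-- the three dash-decorated matches of A correspond exactly to the candidate slices B searches for
theorem cand_iff (a t : List Char) :
    (t = a ∨ '-' :: t = a ∨ '-' :: '-' :: t = a) ↔
    (∃ i ∈ PySem.List.pyRange 0 ((pvDashLoop a 2 0 : Int) + 1) 1,
      PySem.List.slice a (some i) none = t) := by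
  have heq : ∀ (i : Int) (k : Nat), i = (k : Int) →
      (PySem.List.slice a (some i) none = t ↔ a.drop k = t) := by
    rintro i k rfl
    exact slice_eq_drop a t k
  rcases a with _ | ⟨c, tl⟩
  · rw [dash_nil [] rfl]
    constructor
    · rintro (h | h | h)
      · exact ⟨0, PySem.List.mem_pyRange_one.mpr (by omega), (heq 0 0 rfl).mpr (by simp [h])⟩
      · exact absurd h (by simp)
      · exact absurd h (by simp)
    · rintro ⟨i, hi, hs⟩
      have hi0 : i = (0 : Int) := by have := PySem.List.mem_pyRange_one.mp hi; omega
      subst hi0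
      left
      simpa using (heq 0 0 rfl).mp hs
  · by_cases hc : c = '-'
    · subst hc
      rcases tl with _ | ⟨c2, tl2⟩
      · rw [dash_one_nil ['-'] rfl]
        constructor
        · rintro (h | h | h)
          · exact ⟨0, PySem.List.mem_pyRange_one.mpr (by omega), (heq 0 0 rfl).mpr (by simp [h])⟩
          · refine ⟨1, PySem.List.mem_pyRange_one.mpr (by omega), (heq 1 1 rfl).mpr ?_⟩
            simp at h ⊢
            exact h
          · exact absurd h (by simp)
        · rintro ⟨i, hi, hs⟩
          have hib : i = (0 : Int) ∨ i = 1 := by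
            have := PySem.List.mem_pyRange_one.mp hi; omega
          rcases hib with rfl | rfl
          · left
            simpa using ((heq 0 0 rfl).mp hs).symm
          · right; left
            have := (heq 1 1 rfl).mp hs
            simp at this ⊢
            exact this
      · by_cases hc2 : c2 = '-'
        · subst hc2
          rw [dash_two ('-' :: '-' :: tl2) tl2 rfl]
          constructor
          · rintro (h | h | h)
            · exact ⟨0, PySem.List.mem_pyRange_one.mpr (by omega), (heq 0 0 rfl).mpr (by simp [h])⟩
            · refine ⟨1, PySem.List.mem_pyRange_one.mpr (by omega), (heq 1 1 rfl).mpr ?_⟩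
              simp at h ⊢
              exact h.symm
            · refine ⟨2, PySem.List.mem_pyRange_one.mpr (by omega), (heq 2 2 rfl).mpr ?_⟩
              simp at h ⊢
              exact h.symm
          · rintro ⟨i, hi, hs⟩
            have hib : i = (0 : Int) ∨ i = 1 ∨ i = 2 := by
              have := PySem.List.mem_pyRange_one.mp hi; omega
            rcases hib with rfl | rfl | rfl
            · left
              simpa using ((heq 0 0 rfl).mp hs).symm
            · right; left
              have := (heq 1 1 rfl).mp hs
              simp at this ⊢
              exact this.symm
            · right; right
              have := (heq 2 2 rfl).mp hs
              simp at this ⊢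
              exact this.symm
        · rw [dash_one ('-' :: c2 :: tl2) c2 tl2 rfl hc2]
          constructor
          · rintro (h | h | h)
            · exact ⟨0, PySem.List.mem_pyRange_one.mpr (by omega), (heq 0 0 rfl).mpr (by simp [h])⟩
            · refine ⟨1, PySem.List.mem_pyRange_one.mpr (by omega), (heq 1 1 rfl).mpr ?_⟩
              simp at h ⊢
              exact h.symm
            · exfalso
              simp at h
              exact hc2 h.1.symm
          · rintro ⟨i, hi, hs⟩
            have hib : i = (0 : Int) ∨ i = 1 := by
              have := PySem.List.mem_pyRange_one.mp hi; omega
            rcases hib with rfl | rfl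
            · left
              simpa using ((heq 0 0 rfl).mp hs).symm
            · right; left
              have := (heq 1 1 rfl).mp hs
              simp at this ⊢
              exact this.symm
    · rw [dash_not (c :: tl) c tl rfl hc]
      constructor
      · rintro (h | h | h)
        · exact ⟨0, PySem.List.mem_pyRange_one.mpr (by omega), (heq 0 0 rfl).mpr (by simp [h])⟩
        · exfalso; simp at h; exact hc h.1.symm
        · exfalso; simp at h; exact hc h.1.symm
      · rintro ⟨i, hi, hs⟩
        have hi0 : i = (0 : Int) := by have := PySem.List.mem_pyRange_one.mp hi; omega
        subst hi0
        left
        simpa using ((heq 0 0 rfl).mp hs).symm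

-- ===== VERDICT (by name: the statement is the Claim_ definition above) =====
theorem alias_list_has_spec : Claim_equal_alias_list_has := by
  intro lstList strArg _
  unfold Spec_alias_list_has
  rw [A_eq_any]
  simp only [alias_list_has_alt]
  rw [Bool.eq_iff_iff]
  simp only [List.any_eq_true, bsearch_sorted_mem, List.mem_map, Bool.or_eq_true, beq_iff_eq,
    or_assoc]
  constructor
  · rintro ⟨s, hs, h⟩
    obtain ⟨i, hi, hsl⟩ :=
      (cand_iff (PySem.Str.lower strArg).toList (PySem.Str.lower s).toList).mp
        ((strDisj (PySem.Str.lower s) (PySem.Str.lower strArg)).mp h)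
    exact ⟨i, hi, s, hs, hsl.symm⟩
  · rintro ⟨i, hi, s, hs, hsl⟩
    exact ⟨s, hs, (strDisj (PySem.Str.lower s) (PySem.Str.lower strArg)).mpr
      ((cand_iff (PySem.Str.lower strArg).toList (PySem.Str.lower s).toList).mpr ⟨i, hi, hsl.symm⟩)⟩
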